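-- pv_equiv track=rewrite | github.com/iasmimtx/Questoes-p1 | Questoes/somadiminui.py | soma_diminui_vizinhos
-- ===== SOURCE A (Python) =====
-- def soma_diminui_vizinhos(valores):
--     valor = 0
--     for i in range(len(valores)):
--         if (i+1) % 3 == 0:
--             valor -= valores[i]
--         else:
--             valor += valores[i]
--     return valor
-- ===== SOURCE B (Python) =====
-- def soma_diminui_vizinhos(valores):
--     # Chunked sweep: take three elements at a time, add the first two, subtract the third;
--     # the leftover tail (fewer than three elements) is simply added.
--     total = 0
--     i = 0
--     n = len(valores)
--     while i + 3 <= n: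
--         total += valores[i] + valores[i + 1] - valores[i + 2]
--         i += 3
--     return total + sum(valores[i:])
-- ===== Notes on version B (the rewrite author's own statement) =====
-- stated objective: alternative
-- what changed: Replaced the index loop with a modulo-3 sign test by a chunked sweep that consumes three elements at a time (add first two, subtract the third), with a plain sum of the short tail; no index arithmetic or modulo remains.
import Mathlib
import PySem

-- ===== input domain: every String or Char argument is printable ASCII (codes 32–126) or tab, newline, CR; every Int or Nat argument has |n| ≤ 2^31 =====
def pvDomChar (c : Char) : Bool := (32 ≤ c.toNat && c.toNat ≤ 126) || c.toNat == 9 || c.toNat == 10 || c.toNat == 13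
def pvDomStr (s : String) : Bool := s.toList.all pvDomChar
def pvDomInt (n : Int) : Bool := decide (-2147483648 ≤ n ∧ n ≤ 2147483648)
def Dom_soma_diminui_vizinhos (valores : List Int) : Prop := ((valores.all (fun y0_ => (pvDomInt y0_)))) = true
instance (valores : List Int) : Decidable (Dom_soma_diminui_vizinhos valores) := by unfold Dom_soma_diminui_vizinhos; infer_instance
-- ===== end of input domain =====

-- B replaces the signed index loop with a chunked three-at-a-time sweep (alternative decomposition, same cost).

-- ===== PORT A =====
def soma_diminui_vizinhos (valores : List Int) : Int :=
  (PySem.List.pyRange 0 (valores.length : Int) 1).foldl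
    (fun valor i =>
      if PySem.Int.mod (i + 1) 3 == 0 then valor - PySem.List.pyGetD valores i 0
      else valor + PySem.List.pyGetD valores i 0) 0

-- ===== PORT B =====
def somaAltLoop (xs : List Int) (total : Int) (i : Nat) : Int :=
  if i + 3 ≤ xs.length then
    somaAltLoop xs
      (total + (PySem.List.pyGetD xs (i : Int) 0 + PySem.List.pyGetD xs ((i : Int) + 1) 0
                - PySem.List.pyGetD xs ((i : Int) + 2) 0))
      (i + 3)
  else total + (PySem.List.slice xs (some (i : Int)) none).sum
termination_by xs.length - i

def soma_diminui_vizinhos_alt (valores : List Int) : Int :=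
  somaAltLoop valores 0 0

-- ===== PRECONDITION & SPEC =====
def Spec_soma_diminui_vizinhos (valores : List Int) (out : Int) : Prop := out = soma_diminui_vizinhos_alt valores
instance (valores : List Int) (out : Int) : Decidable (Spec_soma_diminui_vizinhos valores out) := by unfold Spec_soma_diminui_vizinhos; infer_instance

-- ===== CLAIM (what is proved, stated in full; the proofs are below) =====
def Claim_equal_soma_diminui_vizinhos : Prop := ∀ (valores : List Int), Dom_soma_diminui_vizinhos valores → Spec_soma_diminui_vizinhos valores (soma_diminui_vizinhos valores)

-- ===== LEMMAS AND PROOFS =====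

/-- Signed sum of a suffix starting at (0-based) index `s`. -/
def mySigned : List Int → Nat → Int
  | [], _ => 0
  | x :: t, s => (if (s + 1) % 3 = 0 then -x else x) + mySigned t (s + 1)

theorem mySigned_add3 : ∀ (t : List Int) (s : Nat), mySigned t (s + 3) = mySigned t s := by
  intro t
  induction t with
  | nil => intro s; rfl
  | cons x t ih =>
      intro s
      simp only [mySigned]
      have h3 : (s + 3 + 1) % 3 = (s + 1) % 3 := by omega
      rw [h3, show s + 3 + 1 = s + 1 + 3 from by omega, ih]

theorem mySigned_small : ∀ (t : List Int), t.length ≤ 2 → mySigned t 0 = t.sum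
  | [], _ => by simp [mySigned]
  | [a], _ => by simp [mySigned]
  | [a, b], _ => by simp [mySigned]; try ring
  | a :: b :: c :: t, h => by simp at h

theorem altLoop_eq (xs : List Int) (i : Nat) (total : Int) :
    somaAltLoop xs total i = total + mySigned (xs.drop i) 0 := by
  rw [somaAltLoop]
  split
  · rename_i h
    rw [altLoop_eq xs (i + 3)]
    have e1 : xs.drop i = xs[i]'(by omega) :: xs.drop (i + 1) :=
      List.drop_eq_getElem_cons (by omega)
    have e2 : xs.drop (i + 1) = xs[i + 1]'(by omega) :: xs.drop (i + 2) :=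
      List.drop_eq_getElem_cons (by omega)
    have e3 : xs.drop (i + 2) = xs[i + 2]'(by omega) :: xs.drop (i + 3) :=
      List.drop_eq_getElem_cons (by omega)
    have g0 : PySem.List.pyGetD xs (i : Int) 0 = xs[i]'(by omega) := by
      rw [PySem.List.pyGetD_eq_getElem xs 0 (by omega) (by exact_mod_cast by omega : (i : Int) < (xs.length : Int))]
      simp
    have g1 : PySem.List.pyGetD xs ((i : Int) + 1) 0 = xs[i + 1]'(by omega) := by
      rw [show (i : Int) + 1 = ((i + 1 : Nat) : Int) from by push_cast; ring]
      rw [PySem.List.pyGetD_eq_getElem xs 0 (by omega) (by exact_mod_cast by omega : ((i + 1 : Nat) : Int) < (xs.length : Int))]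
      have ht : ((i : Int) + 1).toNat = i + 1 := by omega
      simp [ht]
    have g2 : PySem.List.pyGetD xs ((i : Int) + 2) 0 = xs[i + 2]'(by omega) := by
      rw [show (i : Int) + 2 = ((i + 2 : Nat) : Int) from by push_cast; ring]
      rw [PySem.List.pyGetD_eq_getElem xs 0 (by omega) (by exact_mod_cast by omega : ((i + 2 : Nat) : Int) < (xs.length : Int))]
      have ht : ((i : Int) + 2).toNat = i + 2 := by omega
      simp [ht]
    rw [g0, g1, g2, e1, e2, e3]
    simp only [mySigned]
    rw [show (0 : Nat) + 1 + 1 + 1 = 0 + 3 from rfl, mySigned_add3]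
    norm_num
    ring
  · rename_i h
    rw [PySem.List.slice_from xs (by omega)]
    rw [mySigned_small _ (by simp; omega)]
    simp
termination_by xs.length - i
decreasing_by omega

theorem foldA_gen (xs : List Int) : ∀ (t : List Int) (k : Nat) (acc : Int), xs.drop k = t →
    (PySem.List.pyRange (k : Int) (xs.length : Int) 1).foldl
      (fun valor i =>
        if PySem.Int.mod (i + 1) 3 == 0 then valor - PySem.List.pyGetD xs i 0
        else valor + PySem.List.pyGetD xs i 0) acc = acc + mySigned t k := by
  intro t
  induction t with
  | nil =>
      intro k acc hdrop
      have hk : xs.length ≤ k := by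
        by_contra h
        push Not at h
        have := List.drop_eq_nil_iff.mp hdrop
        omega
      rw [PySem.List.pyRange_one_eq_nil (by exact_mod_cast hk)]
      simp [mySigned]
  | cons x t ih =>
      intro k acc hdrop
      have hk : k < xs.length := by
        by_contra h
        push Not at h
        rw [List.drop_eq_nil_iff.mpr h] at hdrop
        simp at hdrop
      rw [PySem.List.pyRange_one_cons (by exact_mod_cast hk)]
      rw [List.foldl_cons]
      have hget : PySem.List.pyGetD xs (k : Int) 0 = x := by
        have h0 : xs[k]? = some x := by
          have h1 : (xs.drop k)[0]? = some x := by rw [hdrop]; rfl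
          rw [List.getElem?_drop] at h1
          simpa using h1
        simp [PySem.List.pyGetD_natCast, List.getD_eq_getElem?_getD, h0]
      have hmod : (PySem.Int.mod ((k : Int) + 1) 3 == 0) = ((k + 1) % 3 = 0 : Bool) := by
        rw [PySem.Int.mod_eq_emod_of_pos (by norm_num)]
        by_cases h : (k + 1) % 3 = 0
        · simp only [h]
          have : ((k : Int) + 1) % 3 = 0 := by omega
          simp [this]
        · have : ((k : Int) + 1) % 3 ≠ 0 := by omega
          simp [h, this]
      have hdrop' : xs.drop (k + 1) = t := by
        have h2 : List.drop 1 (List.drop k xs) = List.drop (k + 1) xs := List.drop_drop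
        rw [← h2, hdrop]
        rfl
      have hcast : (k : Int) + 1 = ((k + 1 : Nat) : Int) := by push_cast; ring
      rw [hcast, ih (k + 1) _ hdrop']
      show (if (PySem.Int.mod (((k:Int)) + 1) 3 == 0) = true then acc - PySem.List.pyGetD xs (k:Int) 0
            else acc + PySem.List.pyGetD xs (k:Int) 0) + mySigned t (k + 1)
          = acc + mySigned (x :: t) k
      rw [hget, hmod]
      simp only [mySigned]
      by_cases h : (k + 1) % 3 = 0 <;> simp only [h, decide_true, decide_false, Bool.false_eq_true, if_true, if_false] <;> try ring

-- ===== VERDICT (by name: the statement is the Claim_ definition above) =====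
theorem soma_diminui_vizinhos_spec : Claim_equal_soma_diminui_vizinhos := by
  intro valores _
  unfold Spec_soma_diminui_vizinhos soma_diminui_vizinhos soma_diminui_vizinhos_alt
  rw [altLoop_eq valores 0 0]
  have h := foldA_gen valores valores 0 0 (by simp)
  simpa using h
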